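-- pv_equiv track=rewrite | github.com/SiddarthAA/TraceX | src/utils/matrix_enhanced.py | _classify_path
-- ===== SOURCE A (Python) =====
-- from typing import Dict, List, Any, Set
--
-- def _classify_path(path: List[str], artifacts: Dict[str, Any]) -> tuple[str, str]:
--     """
--     Classify a trace path as complete/partial/broken.
--
--     Returns: (status_emoji, reason)
--     """
--     if not path:
--         return ('❌ BROKEN', 'Empty path')
--
--     # Get types in path
--     types_in_path = [artifacts[node_id]['type'] for node_id in path if node_id in artifacts]
--
--     # Ideal path: SYSTEM_REQ → SYSTEM_REQ_DECOMPOSED → HLR → LLR → CODE_VAR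
--     has_decomposed = 'SYSTEM_REQ_DECOMPOSED' in types_in_path
--     has_hlr = 'HLR' in types_in_path
--     has_llr = 'LLR' in types_in_path
--     has_var = 'CODE_VAR' in types_in_path
--
--     # Complete: reaches CODE_VAR
--     if has_var:
--         return ('✅ COMPLETE', 'Fully traced to code variable')
--
--     # Partial: has some depth but doesn't reach variable
--     if has_llr:
--         return ('⚠️ PARTIAL', 'Reaches LLR but no variable link')
--     elif has_hlr:
--         return ('⚠️ PARTIAL', 'Reaches HLR but no LLR link')
--     elif has_decomposed:
--         return ('⚠️ PARTIAL', 'Decomposed but no HLR link')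
--     else:
--         return ('❌ BROKEN', 'No decomposition')
-- ===== SOURCE B (Python) =====
-- _RANK = {'SYSTEM_REQ_DECOMPOSED': 1, 'HLR': 2, 'LLR': 3, 'CODE_VAR': 4}
-- _RESULT = [
--     ('\u274c BROKEN', 'No decomposition'),
--     ('\u26a0\ufe0f PARTIAL', 'Decomposed but no HLR link'),
--     ('\u26a0\ufe0f PARTIAL', 'Reaches HLR but no LLR link'),
--     ('\u26a0\ufe0f PARTIAL', 'Reaches LLR but no variable link'),
--     ('\u2705 COMPLETE', 'Fully traced to code variable'),
-- ]
--
-- def _classify_path(path, artifacts):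
--     """
--     Classify a trace path as complete/partial/broken.
--
--     Returns: (status_emoji, reason)
--     """
--     if not path:
--         return ('\u274c BROKEN', 'Empty path')
--     # Single pass: score the path by the deepest trace level it reaches.
--     best = 0
--     for node_id in path:
--         a = artifacts.get(node_id)
--         if a is not None:
--             best = max(best, _RANK.get(a['type'], 0))
--     return _RESULT[best]
-- ===== Notes on version B (the rewrite author's own statement) =====
-- stated objective: alternative
-- what changed: Replaces A's collect-all-types list plus four membership tests in an if/elif priority chain by a single-pass numeric scoring fold (max rank of any type seen) that then indexes a result table by the score.
import Mathlib
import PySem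

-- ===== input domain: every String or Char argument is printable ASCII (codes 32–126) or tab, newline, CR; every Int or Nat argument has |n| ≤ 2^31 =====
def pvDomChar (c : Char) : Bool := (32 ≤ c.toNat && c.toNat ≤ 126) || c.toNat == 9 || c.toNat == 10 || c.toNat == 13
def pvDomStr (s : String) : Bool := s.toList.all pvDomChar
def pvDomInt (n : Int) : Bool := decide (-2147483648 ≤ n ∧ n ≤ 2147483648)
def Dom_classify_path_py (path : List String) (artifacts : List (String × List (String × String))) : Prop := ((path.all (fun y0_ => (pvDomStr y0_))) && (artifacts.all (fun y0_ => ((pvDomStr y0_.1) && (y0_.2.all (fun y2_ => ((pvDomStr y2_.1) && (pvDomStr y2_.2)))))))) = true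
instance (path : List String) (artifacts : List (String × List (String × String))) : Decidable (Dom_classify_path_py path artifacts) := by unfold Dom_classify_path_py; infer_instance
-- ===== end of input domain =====

-- B replaces A's collect-types list + four membership tests in an if/elif priority chain
-- by a single-pass numeric scoring fold (max rank of any type seen) and a table indexed
-- by the score (objective: alternative algorithm; no speed claim).

-- ===== PORT A =====
-- dict lookup on an association list: first match (Python dict semantics on distinct keys)
def pvLookup {nu : Type} (l : List (String × nu)) (k : String) : Option nu :=
  (l.find? (fun p => p.1 == k)).map (fun p => p.2)

def classify_path_py (path : List String) (artifacts : List (String × List (String × String))) : String × String :=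
  if path = [] then ("\u274c BROKEN", "Empty path")
  else
    -- types_in_path = [artifacts[node_id]['type'] for node_id in path if node_id in artifacts]
    -- the inner ['type'] lookup is total only under Pre_ (it would be a KeyError otherwise)
    let types_in_path : List String := path.filterMap (fun node_id =>
      match pvLookup artifacts node_id with
      | some d => some ((pvLookup d "type").getD "")
      | none => none)
    let has_decomposed := types_in_path.contains "SYSTEM_REQ_DECOMPOSED"
    let has_hlr := types_in_path.contains "HLR"
    let has_llr := types_in_path.contains "LLR"
    let has_var := types_in_path.contains "CODE_VAR"
    if has_var then ("\u2705 COMPLETE", "Fully traced to code variable")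
    else if has_llr then ("\u26a0\ufe0f PARTIAL", "Reaches LLR but no variable link")
    else if has_hlr then ("\u26a0\ufe0f PARTIAL", "Reaches HLR but no LLR link")
    else if has_decomposed then ("\u26a0\ufe0f PARTIAL", "Decomposed but no HLR link")
    else ("\u274c BROKEN", "No decomposition")

-- ===== PORT B =====
-- _RANK: rank of each trace level (dict.get(t, 0) ported as first-match lookup with default)
def pvRank : List (String × Int) :=
  [("SYSTEM_REQ_DECOMPOSED", 1), ("HLR", 2), ("LLR", 3), ("CODE_VAR", 4)]

-- _RESULT: outcome table indexed by the best score
def pvResult : List (String × String) :=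
  [("\u274c BROKEN", "No decomposition"),
   ("\u26a0\ufe0f PARTIAL", "Decomposed but no HLR link"),
   ("\u26a0\ufe0f PARTIAL", "Reaches HLR but no LLR link"),
   ("\u26a0\ufe0f PARTIAL", "Reaches LLR but no variable link"),
   ("\u2705 COMPLETE", "Fully traced to code variable")]

def classify_path_py_alt (path : List String) (artifacts : List (String × List (String × String))) : String × String :=
  if path = [] then ("\u274c BROKEN", "Empty path")
  else
    let best : Int := path.foldl (fun b node_id =>
      match pvLookup artifacts node_id with
      | some a => max b ((pvLookup pvRank ((pvLookup a "type").getD "")).getD 0)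
      | none => b) 0
    -- _RESULT[best]; best is always in [0, 4] so the default is never used
    (PySem.List.pyGet? pvResult best).getD ("\u274c BROKEN", "No decomposition")

-- ===== PRECONDITION & SPEC =====
-- Pre_ excludes only inputs where both Pythons raise KeyError: a node on the path whose
-- artifact entry lacks a 'type' key.
def Pre_classify_path_py (path : List String) (artifacts : List (String × List (String × String))) : Prop :=
  ∀ node_id ∈ path, ∀ d ∈ pvLookup artifacts node_id, (pvLookup d "type").isSome = true
instance (path : List String) (artifacts : List (String × List (String × String))) : Decidable (Pre_classify_path_py path artifacts) := by unfold Pre_classify_path_py; infer_instance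
def pvWitness_classify_path_py : List String × (List (String × List (String × String))) :=
  (["a", "b"], [("a", [("type", "HLR")]), ("c", [("type", "LLR")])])
def Spec_classify_path_py (path : List String) (artifacts : List (String × List (String × String))) (out : String × String) : Prop := out = classify_path_py_alt path artifacts
instance (path : List String) (artifacts : List (String × List (String × String))) (out : String × String) : Decidable (Spec_classify_path_py path artifacts out) := by unfold Spec_classify_path_py; infer_instance

-- ===== CLAIM (what is proved, stated in full; the proofs are below) =====
def Claim_equal_classify_path_py : Prop := ∀ (path : List String) (artifacts : List (String × List (String × String))), Dom_classify_path_py path artifacts → Pre_classify_path_py path artifacts → Spec_classify_path_py path artifacts (classify_path_py path artifacts)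

-- ===== LEMMAS AND PROOFS =====

-- rank of a single type string, with its closed characterisation
def pvRankOf (t : String) : Int := (pvLookup pvRank t).getD 0

theorem rank_eq (t : String) : pvRankOf t =
    (if t = "CODE_VAR" then 4 else if t = "LLR" then 3 else if t = "HLR" then 2
     else if t = "SYSTEM_REQ_DECOMPOSED" then 1 else 0) := by
  by_cases h1 : t = "CODE_VAR"
  · subst h1; decide
  by_cases h2 : t = "LLR"
  · subst h2; decide
  by_cases h3 : t = "HLR"
  · subst h3; decide
  by_cases h4 : t = "SYSTEM_REQ_DECOMPOSED"
  · subst h4; decide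
  have e1 : ("SYSTEM_REQ_DECOMPOSED" == t) = false := beq_eq_false_iff_ne.mpr (Ne.symm h4)
  have e2 : ("HLR" == t) = false := beq_eq_false_iff_ne.mpr (Ne.symm h3)
  have e3 : ("LLR" == t) = false := beq_eq_false_iff_ne.mpr (Ne.symm h2)
  have e4 : ("CODE_VAR" == t) = false := beq_eq_false_iff_ne.mpr (Ne.symm h1)
  simp [pvRankOf, pvLookup, pvRank, List.find?, e1, e2, e3, e4, h1, h2, h3, h4]

-- B's fold over the path equals the max-rank fold over A's filtered type list
theorem fold_path_eq (artifacts : List (String × List (String × String))) :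
    ∀ (path : List String) (c : Int),
      path.foldl (fun b node_id =>
        match pvLookup artifacts node_id with
        | some a => max b ((pvLookup pvRank ((pvLookup a "type").getD "")).getD 0)
        | none => b) c =
      (path.filterMap (fun node_id =>
        match pvLookup artifacts node_id with
        | some d => some ((pvLookup d "type").getD "")
        | none => none)).foldl (fun b t => max b (pvRankOf t)) c := by
  intro path
  induction path with
  | nil => intro c; rfl
  | cons x xs ih =>
    intro c
    cases h : pvLookup artifacts x <;> simp [List.foldl, List.filterMap, h, ih, pvRankOf]

-- characterisation of "k ≤ max-rank fold"
theorem fold_ge_iff (k : Int) :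
    ∀ (L : List String) (c : Int),
      k ≤ L.foldl (fun b t => max b (pvRankOf t)) c ↔ k ≤ c ∨ ∃ t ∈ L, k ≤ pvRankOf t := by
  intro L
  induction L with
  | nil => intro c; simp
  | cons x xs ih =>
    intro c
    simp only [List.foldl, ih, le_max_iff, List.mem_cons]
    constructor
    · rintro ((h | h) | ⟨t, ht, hr⟩)
      · exact Or.inl h
      · exact Or.inr ⟨x, Or.inl rfl, h⟩
      · exact Or.inr ⟨t, Or.inr ht, hr⟩
    · rintro (h | ⟨t, (rfl | ht), hr⟩)
      · exact Or.inl (Or.inl h)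
      · exact Or.inl (Or.inr hr)
      · exact Or.inr ⟨t, ht, hr⟩

-- the fold never exceeds 4
theorem fold_le_four : ∀ (L : List String) (c : Int), c ≤ 4 →
    L.foldl (fun b t => max b (pvRankOf t)) c ≤ 4 := by
  intro L
  induction L with
  | nil => intro c hc; simpa using hc
  | cons x xs ih =>
    intro c hc
    apply ih
    have := rank_eq x
    simp only [max_le_iff]
    constructor
    · exact hc
    · rw [this]; split_ifs <;> omega

-- ===== VERDICT (by name: the statement is the Claim_ definition above) =====
theorem classify_path_py_spec : Claim_equal_classify_path_py := by
  intro path artifacts _ _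
  unfold Spec_classify_path_py classify_path_py classify_path_py_alt
  by_cases hp : path = []
  · simp [hp]
  · simp only [hp, if_false]
    rw [fold_path_eq]
    set L : List String := path.filterMap (fun node_id =>
      match pvLookup artifacts node_id with
      | some d => some ((pvLookup d "type").getD "")
      | none => none) with hL
    set m : Int := L.foldl (fun b t => max b (pvRankOf t)) 0 with hm
    have hub : m ≤ 4 := fold_le_four L 0 (by omega)
    have hlb : 0 ≤ m := (fold_ge_iff 0 L 0).2 (Or.inl le_rfl)
    have hcm : ∀ (s : String), L.contains s = true ↔ s ∈ L := fun s => by simp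
    by_cases hv : L.contains "CODE_VAR"
    · have h4 : (4 : Int) ≤ m := (fold_ge_iff 4 L 0).2
        (Or.inr ⟨"CODE_VAR", (hcm _).1 hv, by rw [rank_eq]; simp⟩)
      have : m = 4 := le_antisymm hub h4
      rw [hv, this]; rfl
    · have hvf : L.contains "CODE_VAR" = false := by simpa using hv
      have hnv : "CODE_VAR" ∉ L := fun h => hv ((hcm _).2 h)
      have hm4 : ¬ (4 : Int) ≤ m := by
        intro h
        rcases (fold_ge_iff 4 L 0).1 h with h | ⟨t, ht, hr⟩
        · omega
        · rw [rank_eq] at hr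
          split_ifs at hr with e1 e2 e3 e4 <;> first | (exact hnv (e1 ▸ ht)) | omega
      by_cases hl : L.contains "LLR"
      · have h3 : (3 : Int) ≤ m := (fold_ge_iff 3 L 0).2
          (Or.inr ⟨"LLR", (hcm _).1 hl, by rw [rank_eq]; simp⟩)
        have : m = 3 := by omega
        rw [hvf, hl, this]; rfl
      · have hlf : L.contains "LLR" = false := by simpa using hl
        have hnl : "LLR" ∉ L := fun h => hl ((hcm _).2 h)
        have hm3 : ¬ (3 : Int) ≤ m := by
          intro h
          rcases (fold_ge_iff 3 L 0).1 h with h | ⟨t, ht, hr⟩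
          · omega
          · rw [rank_eq] at hr
            split_ifs at hr with e1 e2 e3 e4 <;>
              first | (exact hnv (e1 ▸ ht)) | (exact hnl (e2 ▸ ht)) | omega
        by_cases hh : L.contains "HLR"
        · have h2 : (2 : Int) ≤ m := (fold_ge_iff 2 L 0).2
            (Or.inr ⟨"HLR", (hcm _).1 hh, by rw [rank_eq]; simp⟩)
          have : m = 2 := by omega
          rw [hvf, hlf, hh, this]; rfl
        · have hhf : L.contains "HLR" = false := by simpa using hh
          have hnh : "HLR" ∉ L := fun h => hh ((hcm _).2 h)
          have hm2 : ¬ (2 : Int) ≤ m := by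
            intro h
            rcases (fold_ge_iff 2 L 0).1 h with h | ⟨t, ht, hr⟩
            · omega
            · rw [rank_eq] at hr
              split_ifs at hr with e1 e2 e3 e4 <;>
                first | (exact hnv (e1 ▸ ht)) | (exact hnl (e2 ▸ ht)) | (exact hnh (e3 ▸ ht)) | omega
          by_cases hd : L.contains "SYSTEM_REQ_DECOMPOSED"
          · have h1 : (1 : Int) ≤ m := (fold_ge_iff 1 L 0).2
              (Or.inr ⟨"SYSTEM_REQ_DECOMPOSED", (hcm _).1 hd, by rw [rank_eq]; simp⟩)
            have : m = 1 := by omega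
            rw [hvf, hlf, hhf, hd, this]; rfl
          · have hdf : L.contains "SYSTEM_REQ_DECOMPOSED" = false := by simpa using hd
            have hnd : "SYSTEM_REQ_DECOMPOSED" ∉ L := fun h => hd ((hcm _).2 h)
            have hm1 : ¬ (1 : Int) ≤ m := by
              intro h
              rcases (fold_ge_iff 1 L 0).1 h with h | ⟨t, ht, hr⟩
              · omega
              · rw [rank_eq] at hr
                split_ifs at hr with e1 e2 e3 e4 <;>
                  first | (exact hnv (e1 ▸ ht)) | (exact hnl (e2 ▸ ht)) | (exact hnh (e3 ▸ ht)) | (exact hnd (e4 ▸ ht)) | omega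
            have : m = 0 := by omega
            rw [hvf, hlf, hhf, hdf, this]; rfl
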